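-- pv_equiv track=rewrite | github.com/weizhixiaoyi/leetcode | weekly/201/1.py | makeGood
-- ===== SOURCE A (Python) =====
-- def makeGood(s: str) -> str:
--     while True:
--         flag = False
--         s_len = len(s)
--         if s_len == 0: return ''
--         for i in range(s_len - 1):
--             if 'a' <= s[i] <= 'z' and 'A' <= s[i + 1] <= 'Z' and s[i] == s[i + 1].lower():
--                 s = s.replace(s[i] + s[i + 1], '')
--                 flag = True
--                 break
--             if 'A' <= s[i] <= 'Z' and 'a' <= s[i + 1] <= 'z' and s[i].lower() == s[i + 1]:
--                 s = s.replace(s[i] + s[i + 1], '')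
--                 flag = True
--                 break
--         if not flag:
--             return s
-- ===== SOURCE B (Python) =====
-- def makeGood(s: str) -> str:
--     st = []
--     for ch in s:
--         if st and st[-1] != ch and st[-1].lower() == ch.lower():
--             st.pop()
--         else:
--             st.append(ch)
--     return ''.join(st)
-- ===== Notes on version B (the rewrite author's own statement) =====
-- stated objective: faster
-- what changed: A repeatedly rescans the string from the start and deletes bad pairs via str.replace until a fixpoint; B does a single left-to-right pass with a stack, popping when the new character forms a same-letter opposite-case pair with the top (equal results by confluence of pair removal).
import Mathlib
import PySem

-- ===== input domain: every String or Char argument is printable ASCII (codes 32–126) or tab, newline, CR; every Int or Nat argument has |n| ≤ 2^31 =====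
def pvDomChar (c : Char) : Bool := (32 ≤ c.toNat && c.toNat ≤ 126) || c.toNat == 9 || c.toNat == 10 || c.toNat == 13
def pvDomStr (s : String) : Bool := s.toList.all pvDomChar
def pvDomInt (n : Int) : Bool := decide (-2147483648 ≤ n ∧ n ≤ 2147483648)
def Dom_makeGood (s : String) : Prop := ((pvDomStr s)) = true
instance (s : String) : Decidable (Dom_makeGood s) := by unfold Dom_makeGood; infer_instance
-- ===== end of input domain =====

-- B replaces A's repeated rescan-and-str.replace passes by a single left-to-right stack pass;
-- the return values are proved equal on all inputs (A is total).

-- ===== PORT A =====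
-- the two branch conditions of A's inner for-loop, in A's order
def pvCondA (x y : Char) : Bool :=
  ('a' ≤ x && x ≤ 'z') && ('A' ≤ y && y ≤ 'Z') && (x == PySem.Chars.lowerChar y)

def pvCondB (x y : Char) : Bool :=
  ('A' ≤ x && x ≤ 'Z') && ('a' ≤ y && y ≤ 'z') && (PySem.Chars.lowerChar x == y)

-- A's 'for i in range(s_len - 1)' scan: the first adjacent pair satisfying a branch condition
def pvScanA : List Char → Option (Char × Char)
  | x :: y :: t =>
    if pvCondA x y then some (x, y)
    else if pvCondB x y then some (x, y)
    else pvScanA (y :: t)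
  | _ => none

-- proof helper for the termination argument of makeGoodLoop (used only through the three
-- lemmas below): PySem.Chars.replace with a 2-char pattern and empty replacement,
-- written as a plain structural recursion
def pvRep (c d : Char) : List Char → List Char
  | [] => []
  | [x] => [x]
  | x :: y :: t => if x = c ∧ y = d then pvRep c d t else x :: pvRep c d (y :: t)

theorem pvRep_go (c d : Char) :
    ∀ (fuel : Nat) (l acc : List Char), l.length ≤ fuel →
      PySem.Chars.replace.go [c, d] [] fuel l acc = acc.reverse ++ pvRep c d l := by
  intro fuel
  induction fuel with
  | zero =>
    intro l acc h
    have : l = [] := List.eq_nil_of_length_eq_zero (Nat.le_zero.mp h)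
    subst this
    simp [PySem.Chars.replace.go, pvRep]
  | succ n ih =>
    intro l acc h
    match l with
    | [] => simp [PySem.Chars.replace.go, pvRep]
    | [x] =>
      have hpre : List.isPrefixOf [c, d] [x] = false := by
        simp [List.isPrefixOf]
      rw [PySem.Chars.replace.go, hpre]
      simp only [Bool.false_eq_true, if_false]
      rw [ih [] (x :: acc) (by simp)]
      simp [pvRep]
    | x :: y :: t =>
      by_cases hxy : x = c ∧ y = d
      · obtain ⟨h1, h2⟩ := hxy
        subst h1; subst h2
        have hpre : List.isPrefixOf [x, y] (x :: y :: t) = true := by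
          simp [List.isPrefixOf]
        rw [PySem.Chars.replace.go, hpre]
        simp only [if_true]
        show PySem.Chars.replace.go [x, y] [] n t acc = acc.reverse ++ pvRep x y (x :: y :: t)
        rw [ih t acc (by simp at h; omega)]
        have : pvRep x y (x :: y :: t) = pvRep x y t := by simp [pvRep]
        rw [this]
      · have hpre : List.isPrefixOf [c, d] (x :: y :: t) = false := by
          simp [List.isPrefixOf]
          intro h1 h2; exact hxy ⟨h1.symm, h2.symm⟩
        rw [PySem.Chars.replace.go, hpre]
        simp only [Bool.false_eq_true, if_false]
        rw [ih (y :: t) (x :: acc) (by simp at h ⊢; omega)]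
        simp [pvRep, if_neg hxy]

theorem pvReplace_eq (c d : Char) (l : List Char) :
    PySem.Chars.replace l [c, d] [] = pvRep c d l := by
  rw [PySem.Chars.replace]
  simp only [List.isEmpty, Bool.false_eq_true, if_false]
  exact pvRep_go c d l.length l [] le_rfl

theorem pvRep_length_le (c d : Char) (l : List Char) : (pvRep c d l).length ≤ l.length := by
  fun_induction pvRep c d l with
  | case1 => exact le_rfl
  | case2 x => exact le_rfl
  | case3 x y t h ih => simp only [List.length_cons]; omega
  | case4 x y t h ih => simp only [List.length_cons] at ih ⊢; omega

theorem pvRep_length_lt (c d : Char) (l : List Char) (h : [c, d] <:+: l) :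
    (pvRep c d l).length < l.length := by
  fun_induction pvRep c d l with
  | case1 => exact absurd h.sublist.length_le (by simp)
  | case2 x => exact absurd h.sublist.length_le (by simp)
  | case3 x y t hc ih =>
    have := pvRep_length_le c d t
    simp only [List.length_cons]
    omega
  | case4 x y t hc ih =>
    have hinf : [c, d] <:+: y :: t := by
      rcases List.infix_cons_iff.mp h with hp | hi
      · exfalso
        rcases hp with ⟨r, hr⟩
        simp at hr
        exact hc ⟨hr.1.symm, hr.2.1.symm⟩
      · exact hi
    have := ih hinf
    simp only [List.length_cons] at this ⊢
    omega

theorem pvScanA_infix : ∀ (l : List Char) (c d : Char), pvScanA l = some (c, d) → [c, d] <:+: l := by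
  intro l
  induction l with
  | nil => intro c d h; simp [pvScanA] at h
  | cons x t ih =>
    intro c d h
    match t with
    | [] => simp [pvScanA] at h
    | y :: t' =>
      rw [pvScanA] at h
      split_ifs at h with h1 h2
      · simp at h
        obtain ⟨hc, hd⟩ := h
        subst hc; subst hd
        exact ⟨[], t', by simp⟩
      · simp at h
        obtain ⟨hc, hd⟩ := h
        subst hc; subst hd
        exact ⟨[], t', by simp⟩
      · exact List.infix_cons (ih c d h)

-- A's while-loop: each pass either finds the first bad adjacent pair, removes ALL occurrences
-- of that 2-char pattern with str.replace and loops, or returns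
def makeGoodLoop (s : List Char) : List Char :=
  if s.length = 0 then []
  else
    match h : pvScanA s with
    | some (c, d) => makeGoodLoop (PySem.Chars.replace s [c, d] [])
    | none => s
termination_by s.length
decreasing_by
  rw [pvReplace_eq]
  exact pvRep_length_lt c d s (pvScanA_infix s c d h)

def makeGood (s : String) : String := String.ofList (makeGoodLoop s.toList)

-- ===== PORT B =====
-- Source B's loop body: pop when the stack top and ch are the same letter in opposite cases,
-- else push (stack kept with its top at the head; ''.join(st) becomes String.ofList of the reversal)
def pvPush (st : List Char) (ch : Char) : List Char :=
  match st with
  | x :: rest =>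
    if x ≠ ch ∧ PySem.Chars.lowerChar x = PySem.Chars.lowerChar ch then rest else ch :: st
  | [] => [ch]

def makeGood_alt (s : String) : String :=
  String.ofList ((s.toList.foldl pvPush []).reverse)

-- ===== PRECONDITION & SPEC =====
def Spec_makeGood (s : String) (out : String) : Prop := out = makeGood_alt s
instance (s : String) (out : String) : Decidable (Spec_makeGood s out) := by unfold Spec_makeGood; infer_instance

-- ===== CLAIM (what is proved, stated in full; the proofs are below) =====
def Claim_equal_makeGood : Prop := ∀ (s : String), Dom_makeGood s → Spec_makeGood s (makeGood s)

-- ===== LEMMAS AND PROOFS =====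

-- "bad pair" = B's pop condition; proved below to coincide with A's two branch conditions
def pvBadP (x y : Char) : Prop := x ≠ y ∧ PySem.Chars.lowerChar x = PySem.Chars.lowerChar y

theorem pvChar_le_iff (a b : Char) : a ≤ b ↔ a.toNat ≤ b.toNat := by
  rw [Char.le_def, UInt32.le_iff_toNat_le]; rfl

theorem pvChar_eq_iff (a b : Char) : a = b ↔ a.toNat = b.toNat := by
  constructor
  · intro h; rw [h]
  · intro h; exact Char.ext (UInt32.toNat_inj.mp h)

theorem pvOfNat_toNat (n : Nat) (h : n < 1000) : (Char.ofNat n).toNat = n := by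
  unfold Char.ofNat
  rw [dif_pos (Or.inl (by omega) : Nat.isValidChar n)]
  simp [Char.toNat, Char.ofNatAux]

theorem pv_a : ('a' : Char).toNat = 97 := rfl
theorem pv_z : ('z' : Char).toNat = 122 := rfl
theorem pv_A : ('A' : Char).toNat = 65 := rfl
theorem pv_Z : ('Z' : Char).toNat = 90 := rfl

theorem pvLower_toNat (c : Char) :
    (PySem.Chars.lowerChar c).toNat =
      if 65 ≤ c.toNat ∧ c.toNat ≤ 90 then c.toNat + 32 else c.toNat := by
  rw [PySem.Chars.lowerChar]
  by_cases h : 65 ≤ c.toNat ∧ c.toNat ≤ 90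
  · rw [if_pos h, if_pos (by simp [PySem.Chars.isupper, pvChar_le_iff, pv_A, pv_Z]; omega)]
    exact pvOfNat_toNat _ (by omega)
  · rw [if_neg (by simp [PySem.Chars.isupper, pvChar_le_iff, pv_A, pv_Z]; omega), if_neg h]

theorem pvCondA_iff (x y : Char) :
    pvCondA x y = true ↔
      97 ≤ x.toNat ∧ x.toNat ≤ 122 ∧ 65 ≤ y.toNat ∧ y.toNat ≤ 90 ∧ x.toNat = y.toNat + 32 := by
  simp only [pvCondA, Bool.and_eq_true, decide_eq_true_eq, beq_iff_eq, pvChar_le_iff,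
    pvChar_eq_iff, pvLower_toNat, pv_a, pv_z, pv_A, pv_Z]
  split_ifs <;> omega

theorem pvCondB_iff (x y : Char) :
    pvCondB x y = true ↔
      65 ≤ x.toNat ∧ x.toNat ≤ 90 ∧ 97 ≤ y.toNat ∧ y.toNat ≤ 122 ∧ y.toNat = x.toNat + 32 := by
  simp only [pvCondB, Bool.and_eq_true, decide_eq_true_eq, beq_iff_eq, pvChar_le_iff,
    pvChar_eq_iff, pvLower_toNat, pv_a, pv_z, pv_A, pv_Z]
  split_ifs <;> omega

theorem pvBadP_iff (x y : Char) :
    pvBadP x y ↔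
      x.toNat ≠ y.toNat ∧
        (if 65 ≤ x.toNat ∧ x.toNat ≤ 90 then x.toNat + 32 else x.toNat) =
          (if 65 ≤ y.toNat ∧ y.toNat ≤ 90 then y.toNat + 32 else y.toNat) := by
  unfold pvBadP
  rw [Ne, pvChar_eq_iff, pvChar_eq_iff, pvLower_toNat, pvLower_toNat]

theorem pvCondA_bad (x y : Char) (h : pvCondA x y = true) : pvBadP x y := by
  rw [pvCondA_iff] at h; rw [pvBadP_iff]; split_ifs <;> omega

theorem pvCondB_bad (x y : Char) (h : pvCondB x y = true) : pvBadP x y := by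
  rw [pvCondB_iff] at h; rw [pvBadP_iff]; split_ifs <;> omega

theorem pvBad_cond (x y : Char) (h : pvBadP x y) : pvCondA x y = true ∨ pvCondB x y = true := by
  rw [pvBadP_iff] at h; rw [pvCondA_iff, pvCondB_iff]; split_ifs at h <;> omega

theorem pvBad_unique (x c d : Char) (h1 : pvBadP x c) (h2 : pvBadP c d) : x = d := by
  rw [pvBadP_iff] at h1 h2; rw [pvChar_eq_iff]; split_ifs at h1 h2 <;> omega

-- the stack invariant: no element of the stack forms a bad pair with the element above it
def pvInv (st : List Char) : Prop := List.IsChain (fun a b => ¬ pvBadP b a) st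

theorem pvPush_pop (x : Char) (rest : List Char) (ch : Char) (h : pvBadP x ch) :
    pvPush (x :: rest) ch = rest := by
  simp only [pvPush]
  split_ifs with hb
  · rfl
  · exact absurd h hb

theorem pvPush_cons (st : List Char) (ch : Char)
    (h : ∀ x, st.head? = some x → ¬ pvBadP x ch) : pvPush st ch = ch :: st := by
  match st with
  | [] => rfl
  | x :: rest =>
    simp only [pvPush]
    split_ifs with hb
    · exact absurd hb (h x rfl)
    · rfl

theorem pvInv_push (st : List Char) (ch : Char) (h : pvInv st) : pvInv (pvPush st ch) := by
  match st with
  | [] => exact List.IsChain.singleton ch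
  | x :: rest =>
    simp only [pvPush]
    split_ifs with hb
    · exact h.of_cons
    · exact List.isChain_cons_cons.mpr ⟨fun hbad => hb hbad, h⟩

theorem pvPush_push (st : List Char) (c d : Char) (hcd : pvBadP c d) (hinv : pvInv st) :
    pvPush (pvPush st c) d = st := by
  match st with
  | [] =>
    simp only [pvPush]
    split_ifs with hb
    · rfl
    · exact absurd hcd hb
  | x :: rest =>
    by_cases hxc : pvBadP x c
    · rw [pvPush_pop x rest c hxc]
      have hxd : x = d := pvBad_unique x c d hxc hcd
      subst hxd
      match rest with
      | [] => rfl
      | y :: t =>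
        have hyx : ¬ pvBadP y x := (List.isChain_cons_cons.mp hinv).1
        exact pvPush_cons (y :: t) x
          (fun z hz => by
            rw [List.head?_cons, Option.some.injEq] at hz
            cases hz
            exact hyx)
    · rw [pvPush_cons (x :: rest) c
        (fun z hz => by
          rw [List.head?_cons, Option.some.injEq] at hz
          cases hz
          exact hxc)]
      exact pvPush_pop c (x :: rest) d hcd

theorem pvNoBad_run :
    ∀ (s st : List Char), List.IsChain (fun a b => ¬ pvBadP a b) s →
      (∀ x y, st.head? = some x → s.head? = some y → ¬ pvBadP x y) →
      List.foldl pvPush st s = s.reverse ++ st := by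
  intro s
  induction s with
  | nil => intro st _ _; simp
  | cons ch t ih =>
    intro st hch hhd
    rw [List.foldl_cons, pvPush_cons st ch (fun x hx => hhd x ch hx rfl),
      ih (ch :: st) hch.of_cons
        (fun x y hx hy => by
          rw [List.head?_cons, Option.some.injEq] at hx
          cases hx
          exact List.IsChain.rel_head? hch hy)]
    simp

theorem pvRep_run (c d : Char) (hcd : pvBadP c d) :
    ∀ (s st : List Char), pvInv st →
      List.foldl pvPush st (pvRep c d s) = List.foldl pvPush st s := by
  intro s
  fun_induction pvRep c d s with
  | case1 => intro st _; rfl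
  | case2 x => intro st _; rfl
  | case3 x y t hc ih =>
    intro st hinv
    obtain ⟨h1, h2⟩ := hc
    subst h1; subst h2
    rw [List.foldl_cons, List.foldl_cons, pvPush_push st x y hcd hinv]
    exact ih st hinv
  | case4 x y t hc ih =>
    intro st hinv
    rw [List.foldl_cons, List.foldl_cons]
    exact ih (pvPush st x) (pvInv_push st x hinv)

theorem pvScanA_none :
    ∀ (l : List Char), pvScanA l = none →
      List.IsChain (fun a b => ¬ pvBadP a b) l := by
  intro l
  induction l with
  | nil => intro _; exact List.IsChain.nil
  | cons x t ih =>
    intro h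
    match t with
    | [] => exact List.IsChain.singleton x
    | y :: t' =>
      rw [pvScanA] at h
      split_ifs at h with h1 h2
      refine List.isChain_cons_cons.mpr ⟨?_, ih h⟩
      intro hb
      rcases pvBad_cond x y hb with hc | hc
      · exact h1 hc
      · exact h2 hc

theorem pvScanA_bad :
    ∀ (l : List Char) (c d : Char), pvScanA l = some (c, d) → pvBadP c d := by
  intro l
  induction l with
  | nil => intro c d h; simp [pvScanA] at h
  | cons x t ih =>
    intro c d h
    match t with
    | [] => simp [pvScanA] at h
    | y :: t' =>
      rw [pvScanA] at h
      split_ifs at h with h1 h2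
      · simp at h
        obtain ⟨hc, hd⟩ := h
        subst hc; subst hd
        exact pvCondA_bad x y h1
      · simp at h
        obtain ⟨hc, hd⟩ := h
        subst hc; subst hd
        exact pvCondB_bad x y h2
      · exact ih c d h

theorem makeGoodLoop_eq (s : List Char) :
    makeGoodLoop s = (List.foldl pvPush [] s).reverse := by
  fun_induction makeGoodLoop s with
  | case1 s hlen =>
    have : s = [] := List.eq_nil_of_length_eq_zero hlen
    subst this
    rfl
  | case2 s hlen c d h ih =>
    rw [ih, pvReplace_eq]
    have := pvRep_run c d (pvScanA_bad s c d h) s [] List.IsChain.nil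
    rw [this]
  | case3 s hlen h =>
    have := pvNoBad_run s [] (pvScanA_none s h) (fun x y hx _ => nomatch hx)
    rw [this]
    simp

-- ===== VERDICT (by name: the statement is the Claim_ definition above) =====
theorem makeGood_spec : Claim_equal_makeGood := by
  intro s _
  unfold Spec_makeGood makeGood makeGood_alt
  rw [makeGoodLoop_eq]
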